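-- pv_equiv track=rewrite | github.com/jonpaulus/Python_129_Final_Project | icon_project.py | scaling
-- ===== SOURCE A (Python) =====
-- def scaling(icon, multiplier):
--     scaling_icon = []
--     for row in icon:
--         for i in range(multiplier):
--             new_row = []
--             for cell in row:
--                 for i in range(multiplier):
--                     new_row.append(cell)
--             scaling_icon.append(new_row)
--     return scaling_icon
-- ===== SOURCE B (Python) =====
-- def scaling(icon, multiplier):
--     # index-arithmetic formulation: output cell (i, j) is icon[i // multiplier][j // multiplier]
--     out = []
--     for i in range(len(icon) * multiplier):
--         row = icon[i // multiplier]
--         out.append([row[j // multiplier] for j in range(len(row) * multiplier)])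
--     return out
-- ===== Notes on version B (the rewrite author's own statement) =====
-- stated objective: alternative
-- what changed: Replaced A's quadruple-nested replication loops by a closed-form index mapping: the output is built by iterating over output coordinates and computing each cell as icon[i // multiplier][j // multiplier] with floor division.
import Mathlib
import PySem

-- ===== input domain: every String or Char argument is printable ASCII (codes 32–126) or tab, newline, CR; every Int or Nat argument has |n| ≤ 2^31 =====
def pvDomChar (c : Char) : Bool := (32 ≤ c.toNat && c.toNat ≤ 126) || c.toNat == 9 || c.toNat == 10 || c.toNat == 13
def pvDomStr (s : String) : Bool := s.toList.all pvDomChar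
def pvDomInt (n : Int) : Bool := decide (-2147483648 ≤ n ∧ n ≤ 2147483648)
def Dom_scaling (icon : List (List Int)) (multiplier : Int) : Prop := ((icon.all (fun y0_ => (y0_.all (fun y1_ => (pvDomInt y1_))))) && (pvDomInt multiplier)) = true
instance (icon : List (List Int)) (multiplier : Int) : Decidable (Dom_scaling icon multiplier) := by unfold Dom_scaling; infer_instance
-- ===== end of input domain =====

-- B replaces A's quadruple-nested replication loops by a closed-form index mapping over
-- output coordinates: out[i][j] = icon[i // multiplier][j // multiplier] (alternative).
-- Equivalence is about the RETURN value; neither version mutates its arguments.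

-- ===== PORT A =====
def scaling (icon : List (List Int)) (multiplier : Int) : List (List Int) :=
  icon.foldl (fun scaling_icon row =>
    (PySem.List.pyRange 0 multiplier 1).foldl (fun scaling_icon _ =>
      scaling_icon ++
        [row.foldl (fun new_row cell =>
          (PySem.List.pyRange 0 multiplier 1).foldl (fun new_row _ => new_row ++ [cell]) new_row) []])
      scaling_icon) []

-- ===== PORT B =====
-- icon[i // multiplier] / row[j // multiplier]: the index is always in range when the
-- range is nonempty (0 ≤ i < len*m forces m > 0 and i//m < len), so pyGetD's default is never used.
def scaling_alt (icon : List (List Int)) (multiplier : Int) : List (List Int) :=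
  (PySem.List.pyRange 0 ((icon.length : Int) * multiplier) 1).map (fun i =>
    let row := PySem.List.pyGetD icon (PySem.Int.floordiv i multiplier) []
    (PySem.List.pyRange 0 ((row.length : Int) * multiplier) 1).map (fun j =>
      PySem.List.pyGetD row (PySem.Int.floordiv j multiplier) 0))

-- ===== PRECONDITION & SPEC =====
def Spec_scaling (icon : List (List Int)) (multiplier : Int) (out : List (List Int)) : Prop := out = scaling_alt icon multiplier
instance (icon : List (List Int)) (multiplier : Int) (out : List (List Int)) : Decidable (Spec_scaling icon multiplier out) := by unfold Spec_scaling; infer_instance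

-- ===== CLAIM (what is proved, stated in full; the proofs are below) =====
def Claim_equal_scaling : Prop := ∀ (icon : List (List Int)) (multiplier : Int), Dom_scaling icon multiplier → Spec_scaling icon multiplier (scaling icon multiplier)

-- ===== LEMMAS AND PROOFS =====

-- folding "append g x" over a list prepends the accumulator to the flatMap
theorem pv_foldl_app {α β : Type} (g : α → List β) :
    ∀ (l : List α) (init : List β),
      l.foldl (fun a x => a ++ g x) init = init ++ l.flatMap g := by
  intro l
  induction l with
  | nil => simp
  | cons x xs ih => intro init; simp [ih]

theorem pv_inner (m : Int) (cell : Int) (nr : List Int) :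
    (PySem.List.pyRange 0 m 1).foldl (fun new_row _ => new_row ++ [cell]) nr
      = nr ++ (PySem.List.pyRange 0 m 1).map (fun _ => cell) := by
  simpa using pv_foldl_app (fun _ : Int => [cell]) (PySem.List.pyRange 0 m 1) nr

theorem pv_row (m : Int) (row : List Int) :
    row.foldl (fun new_row cell =>
        (PySem.List.pyRange 0 m 1).foldl (fun new_row _ => new_row ++ [cell]) new_row) []
      = row.flatMap (fun c => (PySem.List.pyRange 0 m 1).map (fun _ => c)) := by
  have hf : (fun new_row cell =>
        (PySem.List.pyRange 0 m 1).foldl (fun new_row _ => new_row ++ [cell]) new_row)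
      = fun (new_row : List Int) (cell : Int) =>
          new_row ++ (PySem.List.pyRange 0 m 1).map (fun _ => cell) := by
    funext nr c; exact pv_inner m c nr
  rw [hf]
  simpa using pv_foldl_app (fun c : Int => (PySem.List.pyRange 0 m 1).map (fun _ => c)) row []

-- A in closed form: each row stretched horizontally, then replicated vertically
theorem pv_outer (m : Int) (icon : List (List Int)) :
    scaling icon m
      = icon.flatMap (fun row =>
          (PySem.List.pyRange 0 m 1).map (fun _ =>
            row.flatMap (fun c => (PySem.List.pyRange 0 m 1).map (fun _ => c)))) := by
  unfold scaling
  have hf : (fun (scaling_icon : List (List Int)) (row : List Int) =>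
        (PySem.List.pyRange 0 m 1).foldl (fun scaling_icon _ =>
          scaling_icon ++
            [row.foldl (fun new_row cell =>
              (PySem.List.pyRange 0 m 1).foldl (fun new_row _ => new_row ++ [cell]) new_row) []])
          scaling_icon)
      = fun (scaling_icon : List (List Int)) (row : List Int) =>
          scaling_icon ++ (PySem.List.pyRange 0 m 1).map (fun _ =>
            row.flatMap (fun c => (PySem.List.pyRange 0 m 1).map (fun _ => c))) := by
    funext acc row
    rw [pv_row m row]
    simpa using pv_foldl_app
      (fun _ : Int => [row.flatMap (fun c => (PySem.List.pyRange 0 m 1).map (fun _ => c))])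
      (PySem.List.pyRange 0 m 1) acc
  rw [hf]
  simpa using pv_foldl_app
    (fun row : List Int => (PySem.List.pyRange 0 m 1).map (fun _ =>
      row.flatMap (fun c => (PySem.List.pyRange 0 m 1).map (fun _ => c)))) icon []

-- Nat core of the index-arithmetic formulation: reading position j/m of xs for
-- j = 0 .. len*m - 1 produces each element of xs repeated m times.
theorem pv_idx_nat {α : Type} (d : α) (m : Nat) :
    ∀ (xs : List α),
      (List.range (xs.length * m)).map (fun j => xs.getD (j / m) d)
        = xs.flatMap (fun x => List.replicate m x) := by
  intro xs
  induction xs with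
  | nil => simp
  | cons x rest ih =>
    rcases Nat.eq_zero_or_pos m with hm | hm
    · simp [hm]
    · have hlen : (x :: rest).length * m = m + rest.length * m := by
        simp [List.length_cons]; ring
      rw [hlen, List.range_add, List.map_append, List.map_map]
      have h1 : (List.range m).map (fun j => (x :: rest).getD (j / m) d)
          = List.replicate m x := by
        have hc : ∀ j ∈ List.range m, (x :: rest).getD (j / m) d = x := by
          intro j hj
          have : j / m = 0 := Nat.div_eq_of_lt (List.mem_range.mp hj)
          simp [this]
        rw [List.map_congr_left hc]
        simp [List.map_const']
      have h2 : (List.range (rest.length * m)).map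
            ((fun j => (x :: rest).getD (j / m) d) ∘ (fun j => m + j))
          = rest.flatMap (fun x => List.replicate m x) := by
        rw [← ih]
        apply List.map_congr_left
        intro j _
        have : (m + j) / m = j / m + 1 := by
          rw [Nat.add_comm m j, Nat.add_div_right _ hm]
        simp [Function.comp, this]
      rw [h1, h2, List.flatMap_cons]

-- Int version over pyRange / floordiv / pyGetD
theorem pv_idx_int {α : Type} (d : α) (m : Int) (xs : List α) :
    (PySem.List.pyRange 0 ((xs.length : Int) * m) 1).map
        (fun j => PySem.List.pyGetD xs (PySem.Int.floordiv j m) d)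
      = xs.flatMap (fun x => (PySem.List.pyRange 0 m 1).map (fun _ => x)) := by
  rcases (by omega : m ≤ 0 ∨ 0 < m) with hm | hm
  · have h1 : (xs.length : Int) * m ≤ 0 :=
      mul_nonpos_iff.mpr (Or.inl ⟨by positivity, hm⟩)
    rw [PySem.List.pyRange_one_eq_nil (by omega), PySem.List.pyRange_one_eq_nil (by omega)]
    simp
  · obtain ⟨k, hk⟩ : ∃ k : Nat, m = (k : Int) := ⟨m.toNat, by omega⟩
    subst hk
    rw [PySem.List.pyRange_one, PySem.List.pyRange_one]
    have hb : ((xs.length : Int) * (k : Int) - 0).toNat = xs.length * k := by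
      omega
    have hb2 : ((k : Int) - 0).toNat = k := by omega
    rw [hb, hb2, List.map_map]
    have hmap : ((fun j => PySem.List.pyGetD xs (PySem.Int.floordiv j (k : Int)) d)
          ∘ (fun j : Nat => (0 : Int) + (j : Int)))
        = fun j : Nat => xs.getD (j / k) d := by
      funext j
      show PySem.List.pyGetD xs (PySem.Int.floordiv ((0 : Int) + (j : Int)) (k : Int)) d
          = xs.getD (j / k) d
      rw [zero_add, PySem.Int.floordiv_natCast, PySem.List.pyGetD_natCast]
    rw [hmap, pv_idx_nat d k xs]
    congr 1
    funext x
    rw [List.map_map]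
    simp [Function.comp_def, List.map_const']

-- B in the same closed form as A
theorem pv_alt_eq (m : Int) (icon : List (List Int)) :
    scaling_alt icon m
      = icon.flatMap (fun row =>
          (PySem.List.pyRange 0 m 1).map (fun _ =>
            row.flatMap (fun c => (PySem.List.pyRange 0 m 1).map (fun _ => c)))) := by
  unfold scaling_alt
  have step1 : (PySem.List.pyRange 0 ((icon.length : Int) * m) 1).map (fun i =>
        let row := PySem.List.pyGetD icon (PySem.Int.floordiv i m) []
        (PySem.List.pyRange 0 ((row.length : Int) * m) 1).map (fun j =>
          PySem.List.pyGetD row (PySem.Int.floordiv j m) 0))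
      = ((PySem.List.pyRange 0 ((icon.length : Int) * m) 1).map (fun i =>
          PySem.List.pyGetD icon (PySem.Int.floordiv i m) [])).map (fun row =>
          (PySem.List.pyRange 0 ((row.length : Int) * m) 1).map (fun j =>
            PySem.List.pyGetD row (PySem.Int.floordiv j m) 0)) := by
    rw [List.map_map]; rfl
  rw [step1, pv_idx_int [] m icon, List.map_flatMap]
  congr 1
  funext row
  rw [List.map_map]
  apply List.map_congr_left
  intro _ _
  exact pv_idx_int 0 m row

-- ===== VERDICT (by name: the statement is the Claim_ definition above) =====
theorem scaling_spec : Claim_equal_scaling := by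
  intro icon m _
  unfold Spec_scaling
  rw [pv_outer, pv_alt_eq]
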